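-- pv_equiv track=rewrite | github.com/Sidsmartz/DSA | dailyCodingChallenge/L2411_SmallestSubArrayMaximumBitwiseOR.py | smallestSubarrays
-- ===== SOURCE A (Python) =====
-- from typing import List
--
-- def smallestSubarrays(nums: List[int]) -> List[int]:
--     n = len(nums)
--     ans = [0] * n
--     last = [0] * 32  # For each bit (0 to 31), track the farthest index where it's needed
--
--     for i in range(n - 1, -1, -1):
--         for b in range(32):
--             if (nums[i] >> b) & 1:  # If bit 'b' is set in nums[i]
--                 last[b] = i  # Update the last seen index for this bit
--
--         # The farthest index we need to go to from i to include all bits needed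
--         max_idx = i
--         for b in range(32):
--             max_idx = max(max_idx, last[b])
--
--         ans[i] = max_idx - i + 1  # Length of the smallest subarray
--
--     return ans
-- ===== SOURCE B (Python) =====
-- from typing import List
-- from bisect import bisect_left
--
-- def smallestSubarrays(nums: List[int]) -> List[int]:
--     # Per-bit position tables + binary search, instead of A's backward last-seen scan.
--     n = len(nums)
--     pos = []
--     for b in range(32):
--         p = [j for j, x in enumerate(nums) if (x >> b) & 1]
--         if p:
--             pos.append(p)
--     ans = []
--     for i in range(n):
--         m = i
--         for p in pos:
--             k = bisect_left(p, i)
--             if k < len(p):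
--                 v = p[k]
--                 if v > m:
--                     m = v
--         ans.append(m - i + 1)
--     return ans
-- ===== Notes on version B (the rewrite author's own statement) =====
-- stated objective: alternative
-- what changed: Replaces A's backward scan that incrementally maintains a last-seen index per bit with precomputed per-bit sorted position lists queried by binary search (bisect_left) for each start index.
import Mathlib
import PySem

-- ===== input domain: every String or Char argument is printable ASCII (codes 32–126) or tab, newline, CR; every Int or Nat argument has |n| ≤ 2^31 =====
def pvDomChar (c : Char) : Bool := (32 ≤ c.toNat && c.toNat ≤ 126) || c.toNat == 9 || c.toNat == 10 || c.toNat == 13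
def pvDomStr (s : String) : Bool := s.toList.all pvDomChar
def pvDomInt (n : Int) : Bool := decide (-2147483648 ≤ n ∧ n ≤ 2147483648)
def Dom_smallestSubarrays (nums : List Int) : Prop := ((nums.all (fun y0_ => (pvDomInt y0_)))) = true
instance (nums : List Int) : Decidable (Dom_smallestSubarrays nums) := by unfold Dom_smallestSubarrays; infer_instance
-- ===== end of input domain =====

-- B replaces A's backward last-seen-bit scan by per-bit position tables queried with binary search (alternative decomposition, similar cost).

-- ===== PORT A =====
-- `(x >> b) & 1` truthiness test, the expression both Python versions contain verbatim
def pvBitSet (x : Int) (b : Nat) : Bool := PySem.Int.band (x >>> b) 1 != 0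

-- the backward `for i in range(n-1, -1, -1)` loop; ans is filled at position i, i.e. built front-first by cons
def smallestSubarraysGo (nums : List Int) : Nat → List Int → List Int → List Int
  | 0, _, ans => ans
  | i+1, last, ans =>
    let last' := (List.range 32).map (fun b => if pvBitSet (nums.getD i 0) b then (i : Int) else last.getD b 0)
    let maxIdx := last'.foldl (fun m v => max m v) (i : Int)
    smallestSubarraysGo nums i last' ((maxIdx - (i : Int) + 1) :: ans)

def smallestSubarrays (nums : List Int) : List Int :=
  smallestSubarraysGo nums nums.length (List.replicate 32 0) []

-- ===== PORT B =====
-- [j for j, x in enumerate(nums) if (x >> b) & 1]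
def pvPos (nums : List Int) (b : Nat) : List Int :=
  ((PySem.List.enumerate nums 0).filter (fun p => pvBitSet p.2 b)).map (fun p => p.1)

def smallestSubarrays_alt (nums : List Int) : List Int :=
  let pos := ((List.range 32).map (fun b => pvPos nums b)).filter (fun p => !p.isEmpty)
  (List.range nums.length).map (fun (i : Nat) =>
    let m := pos.foldl (fun m p =>
      let k := PySem.List.bisectLeft p ((i : Nat) : Int)
      if k < p.length then
        let v := p.getD k 0
        if m < v then v else m
      else m) ((i : Nat) : Int)
    m - (i : Int) + 1)

-- ===== PRECONDITION & SPEC =====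
def Spec_smallestSubarrays (nums : List Int) (out : List Int) : Prop := out = smallestSubarrays_alt nums
instance (nums : List Int) (out : List Int) : Decidable (Spec_smallestSubarrays nums out) := by unfold Spec_smallestSubarrays; infer_instance

-- ===== CLAIM (what is proved, stated in full; the proofs are below) =====
def Claim_equal_smallestSubarrays : Prop := ∀ (nums : List Int), Dom_smallestSubarrays nums → Spec_smallestSubarrays nums (smallestSubarrays nums)

-- ===== LEMMAS AND PROOFS =====

-- the index A's `last[b]` holds once the scan has reached index i: the first position ≥ i carrying bit b, else the initial 0
def pvLastSpec (nums : List Int) (i b : Nat) : Int :=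
  match (pvPos nums b).find? (fun j => (i : Int) ≤ j) with
  | some j => j
  | none => 0

-- the common value of ans[i]
def pvVal (nums : List Int) (i : Nat) : Int :=
  ((List.range 32).map (pvLastSpec nums i)).foldl (fun m v => max m v) (i : Int) - (i : Int) + 1

theorem pvPos_pairwise (nums : List Int) (b : Nat) : (pvPos nums b).Pairwise (· < ·) := by
  unfold pvPos
  exact List.pairwise_map.mpr (((PySem.List.pairwise_lt_enumerate nums 0).filter _).imp (fun h => h))

theorem mem_pvPos (nums : List Int) (b : Nat) (j : Int) :
    j ∈ pvPos nums b ↔ ∃ (k : Nat) (_ : k < nums.length), j = (k : Int) ∧ pvBitSet nums[k] b := by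
  unfold pvPos
  simp only [List.mem_map, List.mem_filter, PySem.List.mem_enumerate_iff]
  constructor
  · rintro ⟨⟨j', x⟩, ⟨⟨k, hk, hpair⟩, hb⟩, rfl⟩
    cases hpair
    exact ⟨k, hk, by omega, hb⟩
  · rintro ⟨k, hk, rfl, hb⟩
    exact ⟨(0 + (k : Int), nums[k]), ⟨⟨k, hk, rfl⟩, hb⟩, by omega⟩

-- find? (x ≤ ·) on a sorted list is exactly the element at bisect_left
theorem find?_ge_eq_bisect (l : List Int) (hl : l.Pairwise (· < ·)) (x : Int) :
    l.find? (fun j => x ≤ j) = l[PySem.List.bisectLeft l x]? := by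
  obtain ⟨hk, hlt, hge⟩ := PySem.List.bisectLeft_spec l x (hl.imp (fun h => le_of_lt h))
  set k := PySem.List.bisectLeft l x with hkdef
  have htake : (l.take k).find? (fun j => x ≤ j) = none := by
    refine List.find?_eq_none.mpr (fun y hy => ?_)
    obtain ⟨j, hj, hjy⟩ := List.mem_take_iff_getElem.mp hy
    have := hlt j (lt_of_lt_of_le (lt_min_iff.mp hj).2 (le_refl _)) (lt_min_iff.mp hj).1
    simp only [decide_eq_true_eq]
    omega
  by_cases h : k < l.length
  · have hdrop : l.drop k = l[k] :: l.drop (k + 1) := (List.getElem_cons_drop h).symm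
    rw [← List.take_append_drop k l, List.find?_append, htake, Option.none_or, hdrop]
    have : (fun j => decide (x ≤ j)) l[k] = true := by
      simp only [decide_eq_true_eq]; exact hge k h (le_refl _)
    rw [List.find?_cons_of_pos (p := fun j => decide (x ≤ j)) this]
    rw [← hdrop, List.take_append_drop]
    exact (List.getElem?_eq_getElem h).symm
  · have hkl : k = l.length := le_antisymm hk (le_of_not_gt h)
    rw [List.getElem?_eq_none (le_of_eq hkl.symm)]
    refine List.find?_eq_none.mpr (fun y hy => ?_)
    obtain ⟨j, hj, hjy⟩ := List.getElem_of_mem hy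
    have := hlt j hj (by omega)
    simp only [decide_eq_true_eq]
    omega

-- find? on a strictly increasing list containing x returns x
theorem find?_ge_of_mem (l : List Int) (hl : l.Pairwise (· < ·)) (x : Int) (hx : x ∈ l) :
    l.find? (fun j => x ≤ j) = some x := by
  induction l with
  | nil => cases hx
  | cons a l ih =>
    rcases List.mem_cons.mp hx with rfl | hx'
    · simp [List.find?]
    · have ha : a < x := (List.pairwise_cons.mp hl).1 x hx'
      rw [List.find?_cons_of_neg (by simp; omega)]
      exact ih (List.pairwise_cons.mp hl).2 hx'

-- pointwise-equal predicates give equal find?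
theorem find?_congr_mem {α : Type} (l : List α) (p q : α → Bool) (h : ∀ a ∈ l, p a = q a) :
    l.find? p = l.find? q := by
  induction l with
  | nil => rfl
  | cons a l ih =>
    have ha := h a (List.mem_cons_self ..)
    by_cases hp : p a = true
    · rw [List.find?_cons_of_pos hp, List.find?_cons_of_pos (ha ▸ hp)]
    · rw [List.find?_cons_of_neg hp, List.find?_cons_of_neg (by rw [← ha]; exact hp)]
      exact ih (fun a h' => h a (List.mem_cons_of_mem _ h'))

theorem pvLastSpec_step (nums : List Int) (i b : Nat) (hi : i < nums.length) :
    pvLastSpec nums i b = if pvBitSet (nums.getD i 0) b then (i : Int) else pvLastSpec nums (i + 1) b := by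
  rw [List.getD_eq_getElem nums 0 hi]
  unfold pvLastSpec
  by_cases hb : pvBitSet nums[i] b
  · have hmem : (i : Int) ∈ pvPos nums b := (mem_pvPos nums b _).mpr ⟨i, hi, rfl, hb⟩
    rw [find?_ge_of_mem _ (pvPos_pairwise nums b) _ hmem]
    simp [hb]
  · have hcong : ∀ j ∈ pvPos nums b, (decide ((i : Int) ≤ j)) = (decide (((i : Nat) + 1 : Int) ≤ j)) := by
      intro j hj
      obtain ⟨k, hk, rfl, hbk⟩ := (mem_pvPos nums b j).mp hj
      have hne : k ≠ i := by rintro rfl; exact hb hbk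
      simp only [decide_eq_decide]
      omega
    rw [find?_congr_mem _ _ _ hcong]
    simp only [hb]
    norm_cast

theorem pvLastSpec_len (nums : List Int) (b : Nat) : pvLastSpec nums nums.length b = 0 := by
  unfold pvLastSpec
  have : (pvPos nums b).find? (fun j => ((nums.length : Nat) : Int) ≤ j) = none := by
    refine List.find?_eq_none.mpr (fun j hj => ?_)
    obtain ⟨k, hk, rfl, _⟩ := (mem_pvPos nums b j).mp hj
    simp only [decide_eq_true_eq]
    omega
  rw [this]

-- A's loop, characterized
theorem go_spec (nums : List Int) (i : Nat) (hi : i ≤ nums.length) (acc : List Int) :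
    smallestSubarraysGo nums i ((List.range 32).map (pvLastSpec nums i)) acc
      = (List.range i).map (pvVal nums) ++ acc := by
  induction i generalizing acc with
  | zero => simp [smallestSubarraysGo]
  | succ i ih =>
    rw [smallestSubarraysGo]
    have hlast : ((List.range 32).map (fun b =>
        if pvBitSet (nums.getD i 0) b then (i : Int)
        else (((List.range 32).map (pvLastSpec nums (i + 1))).getD b 0)))
        = (List.range 32).map (pvLastSpec nums i) := by
      refine List.map_congr_left (fun b hb => ?_)
      rw [PySem.List.getD_map_range _ 32 b 0 (List.mem_range.mp hb)]
      exact (pvLastSpec_step nums i b (by omega)).symm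
    rw [hlast, ih (by omega)]
    show _ ++ pvVal nums i :: acc = _
    rw [List.range_succ, List.map_append, List.append_assoc]
    rfl

theorem smallestSubarrays_eq_map (nums : List Int) :
    smallestSubarrays nums = (List.range nums.length).map (pvVal nums) := by
  unfold smallestSubarrays
  have hinit : (List.replicate 32 (0 : Int)) = (List.range 32).map (pvLastSpec nums nums.length) := by
    rw [show (List.range 32).map (pvLastSpec nums nums.length) = (List.range 32).map (fun _ => (0 : Int))
          from List.map_congr_left (fun b _ => pvLastSpec_len nums b)]
    simp
  rw [hinit, go_spec nums nums.length (le_refl _) [], List.append_nil]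

-- one bit of B's inner loop equals one bit of A's max fold
theorem bstep_eq (nums : List Int) (i b : Nat) (m : Int) (hm : 0 ≤ m) :
    (let p := pvPos nums b
     let k := PySem.List.bisectLeft p ((i : Nat) : Int)
     if k < p.length then
       let v := p.getD k 0
       if m < v then v else m
     else m) = max m (pvLastSpec nums i b) := by
  have hfind := find?_ge_eq_bisect (pvPos nums b) (pvPos_pairwise nums b) ((i : Nat) : Int)
  by_cases h : PySem.List.bisectLeft (pvPos nums b) ((i : Nat) : Int) < (pvPos nums b).length
  · have hspec : pvLastSpec nums i b
        = (pvPos nums b)[PySem.List.bisectLeft (pvPos nums b) ((i : Nat) : Int)]'h := by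
      unfold pvLastSpec
      rw [hfind, List.getElem?_eq_getElem h]
    simp only []
    rw [if_pos h, List.getD_eq_getElem _ _ h, hspec, max_def]
    split_ifs <;> omega
  · have hspec : pvLastSpec nums i b = 0 := by
      unfold pvLastSpec
      rw [hfind, List.getElem?_eq_none (le_of_not_gt h)]
    simp only []
    rw [if_neg h, hspec]
    omega

theorem pvLastSpec_of_nil (nums : List Int) (i b : Nat) (h : pvPos nums b = []) :
    pvLastSpec nums i b = 0 := by
  unfold pvLastSpec
  rw [h]
  rfl

theorem bfold_eq (nums : List Int) (i : Nat) (bs : List Nat) (m : Int) (hm : 0 ≤ m) :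
    ((bs.map (fun b => pvPos nums b)).filter (fun p => !p.isEmpty)).foldl (fun m p =>
        let k := PySem.List.bisectLeft p ((i : Nat) : Int)
        if k < p.length then
          let v := p.getD k 0
          if m < v then v else m
        else m) m
      = (bs.map (pvLastSpec nums i)).foldl (fun m v => max m v) m := by
  induction bs generalizing m with
  | nil => rfl
  | cons b bs ih =>
    simp only [List.map_cons, List.foldl_cons, List.filter_cons]
    by_cases hnil : pvPos nums b = []
    · have : (!(pvPos nums b).isEmpty) = false := by rw [hnil]; rfl
      rw [this, if_neg (by simp)]
      have : max m (pvLastSpec nums i b) = m := by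
        rw [pvLastSpec_of_nil nums i b hnil]; omega
      rw [this]
      exact ih m hm
    · have : (!(pvPos nums b).isEmpty) = true := by
        simp [hnil]
      rw [this, if_pos rfl, List.foldl_cons, bstep_eq nums i b m hm]
      exact ih _ (le_trans hm (le_max_left _ _))

theorem smallestSubarrays_alt_eq_map (nums : List Int) :
    smallestSubarrays_alt nums = (List.range nums.length).map (pvVal nums) := by
  unfold smallestSubarrays_alt
  refine List.map_congr_left (fun i _ => ?_)
  show (((List.range 32).map (fun b => pvPos nums b)).filter (fun p => !p.isEmpty)).foldl _ ((i : Nat) : Int) - (i : Int) + 1 = _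
  rw [bfold_eq nums i (List.range 32) ((i : Nat) : Int) (by positivity)]
  rfl

-- ===== VERDICT (by name: the statement is the Claim_ definition above) =====
theorem smallestSubarrays_spec : Claim_equal_smallestSubarrays := by
  intro nums _
  unfold Spec_smallestSubarrays
  rw [smallestSubarrays_eq_map, smallestSubarrays_alt_eq_map]
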